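-- pv_equiv track=rewrite | github.com/ShiweiHe0713/Algorithms-Made-Easy | 4_dp/746_min_cost_climbing_stairs.py | minCostClimbingStairs_ksteps_memo
-- ===== SOURCE A (Python) =====
-- from typing import List
-- from functools import lru_cache
--
-- def minCostClimbingStairs_ksteps_memo(cost: List[int], k: int) -> int:
--     """This time, we can take [1,k] steps each time, we can also start at 0 or 1"""
--     @lru_cache(maxsize=None)
--     def dp(i: int) -> int:
--         if i in (0,1):
--             return 0
--         best = float('inf')
--         upper_bound = min(i, k)
--         for j in range(1, upper_bound + 1):
--             best = min(best, dp(i-j)+cost[i-j])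
--         return best
--
--     return dp(len(cost))
-- ===== SOURCE B (Python) =====
-- from typing import List
-- from collections import deque
--
-- def minCostClimbingStairs_ksteps_memo(cost: List[int], k: int) -> int:
--     """Bottom-up DP with a monotonic deque keeping the sliding-window minimum of
--     dp[m]+cost[m] over the last k positions: O(n) instead of O(n*k)."""
--     n = len(cost)
--     if n <= 1:
--         return 0
--     v = [0] * n          # v[m] = dp[m] + cost[m], filled as we go
--     v[0] = cost[0]
--     dq = deque([0])      # indices with strictly increasing v-values
--     prev = 0             # dp[1]
--     for i in range(2, n + 1):
--         m = i - 1
--         v[m] = prev + cost[m]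
--         while dq and v[dq[-1]] >= v[m]:
--             dq.pop()
--         dq.append(m)
--         while dq[0] < i - k:
--             dq.popleft()
--         prev = v[dq[0]]   # dp[i] = min(v[max(0,i-k) : i])
--     return prev
-- ===== Notes on version B (the rewrite author's own statement) =====
-- stated objective: faster
-- what changed: Replaces the memoized top-down recursion with an O(n*k) inner loop by a bottom-up DP whose k-wide window minimum of dp[m]+cost[m] is maintained with a monotonic deque, so each index is pushed and popped at most once.
-- outside the precondition, e.g. on minCostClimbingStairs_ksteps_memo([1, 2], 0): A returns inf, B raises IndexError
import Mathlib
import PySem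

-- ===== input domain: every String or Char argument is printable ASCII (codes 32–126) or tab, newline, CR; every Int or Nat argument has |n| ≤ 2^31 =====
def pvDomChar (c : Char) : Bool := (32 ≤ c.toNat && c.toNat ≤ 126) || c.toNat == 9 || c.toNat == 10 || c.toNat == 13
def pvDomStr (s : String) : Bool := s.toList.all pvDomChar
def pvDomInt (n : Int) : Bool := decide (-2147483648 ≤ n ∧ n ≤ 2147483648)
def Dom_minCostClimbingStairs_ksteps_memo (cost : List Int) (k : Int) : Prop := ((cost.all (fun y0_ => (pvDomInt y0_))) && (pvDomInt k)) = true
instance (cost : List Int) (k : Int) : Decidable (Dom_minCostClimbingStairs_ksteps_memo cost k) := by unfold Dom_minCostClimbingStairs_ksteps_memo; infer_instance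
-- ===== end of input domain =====

-- B replaces A's memoized recursion (O(n*k) work) by a bottom-up DP with a monotonic-deque
-- sliding-window minimum (O(n)); equivalence of the RETURN value is proved on Pre_ below.

-- ===== PORT A =====
-- Python's float('inf') sentinel is modelled as `none`; min(inf, x) = x, inf + c = inf.
def pvOMin (a b : Option Int) : Option Int :=
  match a, b with
  | none, b => b
  | a, none => a
  | some x, some y => some (min x y)

-- dp(i) of A: memoization (lru_cache) does not change the value; same recursion, step for step.
def pvAdp (cost : List Int) (k : Int) : Nat → Option Int
  | 0 => some 0
  | 1 => some 0
  | (i+2) =>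
    let ub : Int := min ((i : Int) + 2) k
    ((PySem.List.pyRange 1 (ub + 1) 1).attach).foldl
      (fun best j =>
        pvOMin best ((pvAdp cost k ((i+2) - j.1.toNat)).map
          (· + PySem.List.pyGetD cost (((i : Int) + 2) - j.1) 0)))
      none
  decreasing_by
    have h := (PySem.List.mem_pyRange_one.mp j.2).1
    omega

-- top level: dp(len(cost)); .getD 0 only matters where dp is inf (k ≤ 0 ∧ len ≥ 2), outside Pre_.
def minCostClimbingStairs_ksteps_memo (cost : List Int) (k : Int) : Int :=
  (pvAdp cost k cost.length).getD 0

-- ===== PORT B =====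
-- the for-loop of Source B: state (v, dq, prev); dq kept front-first like the Python deque.
def pvBgo (cost : List Int) (k : Int) (n : Nat) (i : Nat) (v : List Int) (dq : List Nat) (prev : Int) : Int :=
  if i ≤ n then
    let m := i - 1
    let val := prev + PySem.List.pyGetD cost (m : Int) 0
    let v' := v.set m val
    -- while dq and v[dq[-1]] >= v[m]: dq.pop()  ;  dq.append(m)
    let dq1 := ((dq.reverse.dropWhile (fun (d : Nat) => decide (val ≤ v'.getD d 0))).reverse) ++ [m]
    -- while dq[0] < i - k: dq.popleft()   (dq never empties on Pre_ inputs: m stays)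
    let dq2 := dq1.dropWhile (fun (d : Nat) => decide ((d : Int) < (i : Int) - k))
    let prev' := v'.getD (dq2.headD 0) 0
    pvBgo cost k n (i+1) v' dq2 prev'
  else prev
  termination_by n + 1 - i

def minCostClimbingStairs_ksteps_memo_alt (cost : List Int) (k : Int) : Int :=
  if cost.length ≤ 1 then 0
  else
    pvBgo cost k cost.length 2
      ((List.replicate cost.length 0).set 0 (PySem.List.pyGetD cost 0 0)) [0] 0

-- ===== PRECONDITION & SPEC =====
-- Pre_ excludes k ≤ 0 with len(cost) ≥ 2: there A's loop never runs and it returns float('inf'),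
-- not an int of the declared return type (B raises IndexError there).
def Pre_minCostClimbingStairs_ksteps_memo (cost : List Int) (k : Int) : Prop :=
  1 ≤ k ∨ cost.length ≤ 1
instance (cost : List Int) (k : Int) : Decidable (Pre_minCostClimbingStairs_ksteps_memo cost k) := by
  unfold Pre_minCostClimbingStairs_ksteps_memo; infer_instance

def pvWitness_minCostClimbingStairs_ksteps_memo : List Int × Int := ([5, 3, 7, 1], 2)

def Spec_minCostClimbingStairs_ksteps_memo (cost : List Int) (k : Int) (out : Int) : Prop := out = minCostClimbingStairs_ksteps_memo_alt cost k
instance (cost : List Int) (k : Int) (out : Int) : Decidable (Spec_minCostClimbingStairs_ksteps_memo cost k out) := by unfold Spec_minCostClimbingStairs_ksteps_memo; infer_instance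

-- ===== CLAIM (what is proved, stated in full; the proofs are below) =====
def Claim_equal_minCostClimbingStairs_ksteps_memo : Prop := ∀ (cost : List Int) (k : Int), Dom_minCostClimbingStairs_ksteps_memo cost k → Pre_minCostClimbingStairs_ksteps_memo cost k → Spec_minCostClimbingStairs_ksteps_memo cost k (minCostClimbingStairs_ksteps_memo cost k)

-- ===== LEMMAS AND PROOFS =====

-- minimum of a list, `none` for the empty list
def pvMinL (l : List Int) : Option Int := l.foldl (fun o x => some (match o with | none => x | some a => min a x)) none

-- the mathematical DP: dpM 0 = dpM 1 = 0, dpM i = min of vM over the window [max 0 (i-k), i-1]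
def pvDpM (cost : List Int) (k : Int) : Nat → Int
  | 0 => 0
  | 1 => 0
  | (i+2) =>
    let lo : Nat := (((i : Int) + 2) - k).toNat
    (pvMinL (((List.range' lo (i + 2 - lo)).attach).map
      (fun m => pvDpM cost k m.1 + cost.getD m.1 0))).getD 0
  decreasing_by
    have h := List.mem_range'_1.mp m.2
    omega

def pvVM (cost : List Int) (k : Int) (m : Nat) : Int := pvDpM cost k m + cost.getD m 0

-- ---- minimum-of-list toolkit ----

theorem pvFoldF_some (l : List Int) (a : Int) :
    l.foldl (fun o x => some (match o with | none => x | some a => min a x)) (some a)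
      = some (l.foldl min a) := by
  induction l generalizing a with
  | nil => rfl
  | cons y l ih => simpa using ih (min a y)

theorem pvMinL_cons (x : Int) (l : List Int) : pvMinL (x :: l) = some (l.foldl min x) := by
  simpa [pvMinL] using pvFoldF_some l x

theorem pv_foldl_min_le_init (l : List Int) (a : Int) : l.foldl min a ≤ a := by
  induction l generalizing a with
  | nil => simp
  | cons y l ih => exact le_trans (ih (min a y)) (min_le_left _ _)

theorem pv_foldl_min_le_mem {l : List Int} {x : Int} (h : x ∈ l) (a : Int) :
    l.foldl min a ≤ x := by
  induction l generalizing a with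
  | nil => cases h
  | cons y l ih =>
    rcases List.mem_cons.mp h with rfl | h'
    · exact le_trans (pv_foldl_min_le_init l (min a x)) (min_le_right _ _)
    · exact ih h' (min a y)

theorem pv_foldl_min_mem (l : List Int) (a : Int) : l.foldl min a = a ∨ l.foldl min a ∈ l := by
  induction l generalizing a with
  | nil => simp
  | cons y l ih =>
    rw [List.foldl_cons]
    rcases ih (min a y) with h | h
    · rw [h]
      rcases min_choice a y with h' | h'
      · exact Or.inl h'
      · right; rw [h']; exact List.mem_cons_self
    · exact Or.inr (List.mem_cons_of_mem _ h)

theorem pvMinL_spec {l : List Int} (h : l ≠ []) :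
    ∃ b, pvMinL l = some b ∧ b ∈ l ∧ ∀ x ∈ l, b ≤ x := by
  cases l with
  | nil => exact absurd rfl h
  | cons x l =>
    refine ⟨l.foldl min x, pvMinL_cons x l, ?_, ?_⟩
    · rcases pv_foldl_min_mem l x with h' | h'
      · simp [h']
      · simp [h']
    · intro y hy
      rcases List.mem_cons.mp hy with rfl | hy'
      · exact pv_foldl_min_le_init l y
      · exact pv_foldl_min_le_mem hy' x

theorem pvMinL_eq_some {l : List Int} {a : Int} (h1 : a ∈ l) (h2 : ∀ x ∈ l, a ≤ x) :
    pvMinL l = some a := by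
  obtain ⟨b, hb, hbm, hble⟩ := pvMinL_spec (l := l) (by rintro rfl; cases h1)
  have : b = a := le_antisymm (hble a h1) (h2 b hbm)
  rw [hb, this]

theorem pvMinL_congr_mem {l₁ l₂ : List Int} (h : ∀ x, x ∈ l₁ ↔ x ∈ l₂) :
    pvMinL l₁ = pvMinL l₂ := by
  cases l₁ with
  | nil =>
    cases l₂ with
    | nil => rfl
    | cons y l₂ => exact absurd ((h y).mpr (by simp)) (by simp)
  | cons x l₁ =>
    obtain ⟨b, hb, hbm, hble⟩ := pvMinL_spec (l := x :: l₁) (by simp)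
    rw [hb, pvMinL_eq_some ((h b).mp hbm) (fun y hy => hble y ((h y).mpr hy))]

-- ---- dropWhile toolkit ----

theorem pv_mem_dropWhile {α : Type} {p : α → Bool} {l : List α} {x : α}
    (hp : p x = false) (hx : x ∈ l) : x ∈ l.dropWhile p := by
  have hsplit : l.takeWhile p ++ l.dropWhile p = l := List.takeWhile_append_dropWhile
  rw [← hsplit] at hx
  rcases List.mem_append.mp hx with h | h
  · exact absurd (List.mem_takeWhile_imp h) (by simp [hp])
  · exact h

theorem pv_p_of_not_mem_dropWhile {α : Type} {p : α → Bool} {l : List α} {x : α}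
    (hx : x ∈ l) (h : x ∉ l.dropWhile p) : p x = true := by
  have hsplit : l.takeWhile p ++ l.dropWhile p = l := List.takeWhile_append_dropWhile
  rw [← hsplit] at hx
  rcases List.mem_append.mp hx with h' | h'
  · exact List.mem_takeWhile_imp h'
  · exact absurd h' h

theorem pv_dropWhile_cons_false {α : Type} {p : α → Bool} {l : List α} {x : α} {xs : List α}
    (h : l.dropWhile p = x :: xs) : p x = false := by
  induction l with
  | nil => simp at h
  | cons a l ih =>
    rw [List.dropWhile_cons] at h
    by_cases hp : p a
    · rw [if_pos hp] at h; exact ih h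
    · rw [if_neg hp] at h
      cases h
      simpa using hp

-- ---- the dpM unfolding for 2 ≤ i ----

theorem pvDpM_eq (cost : List Int) (k : Int) (i : Nat) (h : 2 ≤ i) :
    pvDpM cost k i
      = (pvMinL ((List.range' (((i : Int) - k).toNat) (i - ((i : Int) - k).toNat)).map
          (pvVM cost k))).getD 0 := by
  obtain ⟨i', rfl⟩ : ∃ i', i = i' + 2 := ⟨i - 2, by omega⟩
  rw [pvDpM]
  have hc : (((i' : Int) + 2) - k).toNat = ((((i' + 2 : Nat)) : Int) - k).toNat := by omega
  rw [List.attach_map_val (f := fun m => pvDpM cost k m + cost.getD m 0)]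
  rw [hc]
  rfl

theorem pvOMin_some (o : Option Int) (x : Int) :
    pvOMin o (some x) = some (match o with | none => x | some a => min a x) := by
  cases o <;> rfl

theorem pvMinL_map {α : Type} (g : α → Int) (l : List α) :
    l.foldl (fun o j => some (match o with | none => g j | some a => min a (g j))) none
      = pvMinL (l.map g) := by
  rw [pvMinL, List.foldl_map]

-- ---- A's dp equals the mathematical dp (k ≥ 1) ----

theorem pvAdp_eq_dpM (cost : List Int) (k : Int) (hk : 1 ≤ k) :
    ∀ i, pvAdp cost k i = some (pvDpM cost k i) := by
  intro i
  induction i using Nat.strong_induction_on with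
  | _ i IH =>
    match i with
    | 0 => simp [pvAdp, pvDpM]
    | 1 => simp [pvAdp, pvDpM]
    | (i + 2) =>
      rw [pvAdp]
      have hub : (1 : Int) ≤ min ((i : Int) + 2) k := by omega
      -- replace recursive calls using IH, turning the fold into pvMinL of a mapped list
      rw [List.foldl_attach
        (f := fun best j => pvOMin best ((pvAdp cost k ((i+2) - j.toNat)).map
          (· + PySem.List.pyGetD cost (((i : Int) + 2) - j) 0)))]
      rw [List.foldl_ext _
        (fun (best : Option Int) (j : Int) =>
          some (match best with
                | none => pvVM cost k ((i+2) - j.toNat)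
                | some a => min a (pvVM cost k ((i+2) - j.toNat))))
        none
        (by
          intro best j hj
          have hjb := (PySem.List.mem_pyRange_one).mp hj
          have h1 : 1 ≤ j := hjb.1
          have h2 : j < min ((i : Int) + 2) k + 1 := hjb.2
          have hlt : (i + 2) - j.toNat < i + 2 := by omega
          rw [IH _ hlt, Option.map_some, pvOMin_some]
          have h0 : (0 : Int) ≤ ((i : Int) + 2) - j := by omega
          have := PySem.List.pyGetD_of_nonneg (xs := cost) (i := ((i : Int) + 2) - j) (d := 0) h0
          rw [this]
          have : (((i : Int) + 2) - j).toNat = (i + 2) - j.toNat := by omega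
          rw [this]
          rfl)]
      rw [pvMinL_map (fun j : Int => pvVM cost k ((i+2) - j.toNat))]
      have hA : pvMinL ((PySem.List.pyRange 1 (min ((i : Int) + 2) k + 1) 1).map
          (fun j : Int => pvVM cost k ((i+2) - j.toNat)))
          = pvMinL ((List.range' ((((i + 2 : Nat) : Int)) - k).toNat
              ((i + 2) - ((((i + 2 : Nat) : Int)) - k).toNat)).map (pvVM cost k)) := by
        apply pvMinL_congr_mem
        intro x
        simp only [List.mem_map, PySem.List.mem_pyRange_one, List.mem_range'_1]
        constructor
        · rintro ⟨j, ⟨hj1, hj2⟩, rfl⟩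
          exact ⟨(i + 2) - j.toNat, by omega, rfl⟩
        · rintro ⟨m, hm, rfl⟩
          refine ⟨((i : Int) + 2) - m, by omega, by
            congr 1
            omega⟩
      rw [hA, pvDpM_eq cost k (i+2) (by omega)]
      obtain ⟨b, hb, _, _⟩ := pvMinL_spec
        (l := (List.range' ((((i + 2 : Nat) : Int)) - k).toNat
          ((i + 2) - ((((i + 2 : Nat) : Int)) - k).toNat)).map (pvVM cost k))
        (by simp [List.range'_eq_nil_iff]; omega)
      rw [hb]
      rfl

theorem pvBgo_eq_dpM (cost : List Int) (k : Int) (hk : 1 ≤ k) (n : Nat) (hn : 2 ≤ n)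
    (hlen : cost.length = n) :
    ∀ (fuel i : Nat) (v : List Int) (dq : List Nat) (prev : Int),
      i + fuel = n + 1 → 2 ≤ i →
      v.length = n →
      (∀ m', m' < i - 1 → v.getD m' 0 = pvVM cost k m') →
      prev = pvDpM cost k (i - 1) →
      dq.Pairwise (fun a b => a < b ∧ pvVM cost k a < pvVM cost k b) →
      (∀ d ∈ dq, d ≤ i - 2) →
      (∀ m' : Nat, (i : Int) - 1 - k ≤ (m' : Int) → m' ≤ i - 2 →
        ∃ d ∈ dq, m' ≤ d ∧ pvVM cost k d ≤ pvVM cost k m') →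
      pvBgo cost k n i v dq prev = pvDpM cost k n := by
  intro fuel
  induction fuel with
  | zero =>
    intro i v dq prev hfi h2 hvlen hv hprev hpair hub hcov
    rw [pvBgo, if_neg (by omega)]
    rw [hprev]
    congr 1
    omega
  | succ fuel ih =>
    intro i v dq prev hfi h2 hvlen hv hprev hpair hub hcov
    by_cases hcase : i ≤ n
    · rw [pvBgo, if_pos hcase]
      set m := i - 1 with hm
      set val := prev + PySem.List.pyGetD cost (m : Int) 0 with hvaldef
      set v' := v.set m val with hv'def
      set p1 : Nat → Bool := fun d => decide (val ≤ v'.getD d 0) with hp1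
      set t := dq.reverse.dropWhile p1 with htdef
      set dq1 : List Nat := t.reverse ++ [m] with hdq1def
      set p2 : Nat → Bool := fun d => decide ((d : Int) < (i : Int) - k) with hp2
      set dq2 := dq1.dropWhile p2 with hdq2def
      -- val is the new window value vM m
      have hmn : m < n := by omega
      have hval : val = pvVM cost k m := by
        rw [hvaldef, hprev, PySem.List.pyGetD_natCast, pvVM, hm]
      -- entries of v' below i are the vM values
      have hgetv' : ∀ m', m' < i → v'.getD m' 0 = pvVM cost k m' := by
        intro m' hm'
        rw [hv'def, List.getD_eq_getElem?_getD, List.getElem?_set]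
        by_cases he : m = m'
        · rw [if_pos he, if_pos (by omega), Option.getD_some, hval, he]
        · rw [if_neg he, ← List.getD_eq_getElem?_getD]
          exact hv m' (by omega)
      have hveq : ∀ d ∈ dq, v'.getD d 0 = pvVM cost k d := by
        intro d hd
        exact hgetv' d (by have := hub d hd; omega)
      -- the kept back part t
      have ht_mem : ∀ a ∈ t, a ∈ dq := by
        intro a ha
        exact List.mem_reverse.mp ((List.dropWhile_sublist p1).mem ha)
      have ht_pair : t.Pairwise (fun a b => b < a ∧ pvVM cost k b < pvVM cost k a) := by
        exact List.Pairwise.sublist (List.dropWhile_sublist p1) (List.pairwise_reverse.mpr hpair)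
      have F1 : ∀ a ∈ t, pvVM cost k a < val := by
        intro a ha
        obtain ⟨h0, tl, hteq⟩ : ∃ h0 tl, t = h0 :: tl := by
          cases hts : t with
          | nil => rw [hts] at ha; cases ha
          | cons x xs => exact ⟨x, xs, rfl⟩
        have hph0 : p1 h0 = false :=
          pv_dropWhile_cons_false (by rw [← htdef]; exact hteq)
        have hm0 : h0 ∈ t := by rw [hteq]; exact List.mem_cons_self
        have hlt0 : pvVM cost k h0 < val := by
          have he := hveq h0 (ht_mem _ hm0)
          have h1 : ¬ (val ≤ v'.getD h0 0) := by
            simpa [hp1] using hph0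
          omega
        rw [hteq] at ha ht_pair
        rcases List.mem_cons.mp ha with rfl | ha'
        · exact hlt0
        · have := (List.pairwise_cons.mp ht_pair).1 a ha'
          omega
      have F2 : ∀ d ∈ dq, d ∉ t → val ≤ pvVM cost k d := by
        intro d hd hdt
        have hp : p1 d = true :=
          pv_p_of_not_mem_dropWhile (List.mem_reverse.mpr hd) (by rw [← htdef]; exact hdt)
        have : val ≤ v'.getD d 0 := by simpa [hp1] using hp
        rw [hveq d hd] at this
        exact this
      -- dq1 properties
      have hmem_dq1 : ∀ a, a ∈ dq1 ↔ a ∈ t ∨ a = m := by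
        intro a
        simp [hdq1def, List.mem_append, List.mem_reverse]
      have P_pair1 : dq1.Pairwise (fun a b => a < b ∧ pvVM cost k a < pvVM cost k b) := by
        rw [hdq1def]
        apply List.pairwise_append.mpr
        refine ⟨List.pairwise_reverse.mpr ht_pair, List.pairwise_singleton _ _, ?_⟩
        intro a ha b hb
        rw [List.mem_singleton] at hb
        subst hb
        have ha' := List.mem_reverse.mp ha
        constructor
        · have := hub a (ht_mem a ha')
          omega
        · rw [← hval]
          exact F1 a ha'
      have P_ub1 : ∀ d ∈ dq1, d ≤ i - 1 := by
        intro d hd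
        rcases (hmem_dq1 d).mp hd with h | h
        · have := hub d (ht_mem d h); omega
        · omega
      have hm_dq2 : m ∈ dq2 := by
        rw [hdq2def]
        apply pv_mem_dropWhile
        · simp only [hp2, decide_eq_false_iff_not, not_lt]
          omega
        · exact (hmem_dq1 m).mpr (Or.inr rfl)
      have P_pair2 : dq2.Pairwise (fun a b => a < b ∧ pvVM cost k a < pvVM cost k b) :=
        List.Pairwise.sublist (List.dropWhile_sublist p2) P_pair1
      have hmem_dq21 : ∀ d ∈ dq2, d ∈ dq1 := by
        intro d hd
        exact (List.dropWhile_sublist p2).mem hd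
      have P_cov2 : ∀ m' : Nat, (i : Int) - k ≤ (m' : Int) → m' ≤ i - 1 →
          ∃ d ∈ dq2, m' ≤ d ∧ pvVM cost k d ≤ pvVM cost k m' := by
        intro m' hlow hup
        by_cases hcm : m' = m
        · exact ⟨m, hm_dq2, by omega, by rw [hcm]⟩
        · have hup' : m' ≤ i - 2 := by omega
          obtain ⟨d, hd, hmd, hvd⟩ := hcov m' (by omega) hup'
          have hstep : ∃ d₁ ∈ dq1, m' ≤ d₁ ∧ pvVM cost k d₁ ≤ pvVM cost k m' := by
            by_cases hdt : d ∈ t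
            · exact ⟨d, (hmem_dq1 d).mpr (Or.inl hdt), hmd, hvd⟩
            · refine ⟨m, (hmem_dq1 m).mpr (Or.inr rfl), by omega, ?_⟩
              have := F2 d hd hdt
              rw [hval] at this
              omega
          obtain ⟨d₁, hd₁, hmd₁, hvd₁⟩ := hstep
          refine ⟨d₁, ?_, hmd₁, hvd₁⟩
          rw [hdq2def]
          apply pv_mem_dropWhile _ hd₁
          simp only [hp2, decide_eq_false_iff_not, not_lt]
          omega
      -- the head of dq2 is the window minimum
      have hdq2ne : dq2 ≠ [] := by intro h; rw [h] at hm_dq2; cases hm_dq2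
      obtain ⟨h0, rest, hdq2eq⟩ : ∃ h0 rest, dq2 = h0 :: rest := by
        cases hdq2 : dq2 with
        | nil => exact absurd hdq2 hdq2ne
        | cons a l => exact ⟨a, l, rfl⟩
      have hh_not : p2 h0 = false :=
        pv_dropWhile_cons_false (p := p2) (by rw [← hdq2def]; exact hdq2eq)
      have hh_low : (i : Int) - k ≤ (h0 : Int) := by
        simp only [hp2, decide_eq_false_iff_not, not_lt] at hh_not
        omega
      have hh_ub : h0 ≤ i - 1 := P_ub1 _ (hmem_dq21 _ (by rw [hdq2eq]; simp))
      have hh_min : ∀ d ∈ dq2, pvVM cost k h0 ≤ pvVM cost k d := by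
        intro d hd
        rw [hdq2eq] at hd
        rcases List.mem_cons.mp hd with rfl | hd'
        · omega
        · rw [hdq2eq] at P_pair2
          have := (List.pairwise_cons.mp P_pair2).1 d hd'
          omega
      have hprev' : v'.getD (dq2.headD 0) 0 = pvDpM cost k i := by
        rw [hdq2eq]
        show v'.getD h0 0 = pvDpM cost k i
        rw [hgetv' h0 (by omega)]
        rw [pvDpM_eq cost k i (by omega)]
        have hlo1 : (((i : Int) - k)).toNat ≤ i - 1 := by omega
        rw [pvMinL_eq_some (a := pvVM cost k h0) ?_ ?_]
        · rfl
        · apply List.mem_map_of_mem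
          apply List.mem_range'_1.mpr
          omega
        · intro x hx
          obtain ⟨m', hm', rfl⟩ := List.mem_map.mp hx
          have hm'b := List.mem_range'_1.mp hm'
          obtain ⟨d, hd, hmd, hvd⟩ := P_cov2 m' (by omega) (by omega)
          have := hh_min d hd
          omega
      -- apply the induction hypothesis at i + 1
      apply ih (i + 1) v' dq2 (v'.getD (dq2.headD 0) 0)
      · omega
      · omega
      · rw [hv'def]; simpa using hvlen
      · intro m' hm'
        exact hgetv' m' (by omega)
      · rw [hprev']
        congr 1
      · exact P_pair2
      · intro d hd
        have := P_ub1 d (hmem_dq21 d hd)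
        omega
      · intro m' hlow hup
        apply P_cov2 m' (by push_cast at hlow ⊢; omega) (by omega)
    · rw [pvBgo, if_neg hcase]
      rw [hprev]
      congr 1
      omega

-- ===== VERDICT (by name: the statement is the Claim_ definition above) =====
theorem minCostClimbingStairs_ksteps_memo_spec : Claim_equal_minCostClimbingStairs_ksteps_memo := by
  intro cost k _ hpre
  unfold Spec_minCostClimbingStairs_ksteps_memo
  unfold minCostClimbingStairs_ksteps_memo minCostClimbingStairs_ksteps_memo_alt
  by_cases hlen : cost.length ≤ 1
  · rw [if_pos hlen]
    obtain h0 | h1 : cost.length = 0 ∨ cost.length = 1 := by omega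
    · rw [h0]; simp [pvAdp]
    · rw [h1]; simp [pvAdp]
  · rw [if_neg hlen]
    have hk : 1 ≤ k := hpre.resolve_right hlen
    have hn : 2 ≤ cost.length := by omega
    rw [pvAdp_eq_dpM cost k hk, Option.getD_some]
    symm
    apply pvBgo_eq_dpM cost k hk cost.length hn rfl (cost.length - 1) 2
    · omega
    · omega
    · simp
    · intro m' hm'
      have hm0 : m' = 0 := by omega
      rw [hm0, List.getD_eq_getElem?_getD, List.getElem?_set, if_pos rfl,
        if_pos (by simp; omega), Option.getD_some, PySem.List.pyGetD_zero, pvVM]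
      simp [pvDpM]
    · simp [pvDpM]
    · simp
    · intro d hd
      rw [List.mem_singleton] at hd
      omega
    · intro m' hlow hup
      have hm0 : m' = 0 := by omega
      subst hm0
      exact ⟨0, by simp, le_refl _, le_refl _⟩
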